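-- pv_equiv track=rewrite | github.com/n0execution/Cracking-the-code-interview | Bit_Manipulation/python/next_number.py | get_prev2
-- ===== SOURCE A (Python) =====
-- def get_bit(num, i):
--     return ((num & (1 << i)) != 0)
--
-- def set_bit(num, i):
--     return num | (1 << i)
--
-- def clear_bit(num, i):
--     mask = ~(1 << i)
--
--     return num & mask
--
-- def get_prev2(num):
--     ones = 0
--     trailing = False
--
--     for i in range(32):
--         if get_bit(num, i) and trailing:
--             index = i
--             break
--         elif get_bit(num, i):
--             ones += 1
--         else:
--             trailing = True
--
--     prev = num
--
--     for i in range(32):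
--         if i == index:
--             prev = clear_bit(prev, i)
--             return prev
--         elif index - ones - 1 <= i:
--             prev = set_bit(prev, i)
--         else:
--             prev = clear_bit(prev, i)
-- ===== SOURCE B (Python) =====
-- def get_prev2(num):
--     # count trailing ones, then find the next set bit above the zero gap,
--     # then rebuild the result with one closed-form mask expression.
--     ones = 0
--     while ones < 32 and (num >> ones) & 1:
--         ones += 1
--     index = ones + 1
--     while index < 32 and not ((num >> index) & 1):
--         index += 1
--     return (num & ~((1 << (index + 1)) - 1)) | (((1 << (ones + 1)) - 1) << (index - ones - 1))
-- ===== Notes on version B (the rewrite author's own statement) =====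
-- stated objective: simpler
-- what changed: The flag-driven full-width bit scan is replaced by two short whiles that stop at the trailing-ones count and at the next set bit, and the entire second per-bit set/clear loop is replaced by a single closed-form mask expression.
import Mathlib
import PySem

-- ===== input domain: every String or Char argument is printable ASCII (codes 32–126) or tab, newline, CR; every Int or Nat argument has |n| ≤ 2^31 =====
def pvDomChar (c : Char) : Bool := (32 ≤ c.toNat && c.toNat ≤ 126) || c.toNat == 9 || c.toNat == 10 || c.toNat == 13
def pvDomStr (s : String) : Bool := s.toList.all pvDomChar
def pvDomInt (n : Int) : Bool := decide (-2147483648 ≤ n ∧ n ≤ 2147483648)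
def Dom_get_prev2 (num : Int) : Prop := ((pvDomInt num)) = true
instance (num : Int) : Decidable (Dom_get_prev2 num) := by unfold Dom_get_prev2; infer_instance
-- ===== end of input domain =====

-- B replaces A's flag-driven full-width scan and its whole per-bit set/clear rebuild loop by two
-- short whiles (trailing-ones count, next set bit) and one closed-form mask expression (simpler).

-- ===== PORT A =====
def get_bit (num : Int) (i : Nat) : Bool := decide (PySem.Int.band num ((1:Int) <<< i) ≠ 0)

def set_bit (num : Int) (i : Nat) : Int := PySem.Int.bor num ((1:Int) <<< i)

def clear_bit (num : Int) (i : Nat) : Int := PySem.Int.band num (Int.not ((1:Int) <<< i))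

-- first `for i in range(32)` loop of A: returns (index, ones) at `break`, none if the loop
-- completes (Python then raises UnboundLocalError on `index`; excluded by Pre_get_prev2)
def loop1 (num : Int) (i ones : Nat) (trailing : Bool) : Option (Nat × Nat) :=
  if h : i < 32 then
    if get_bit num i && trailing then some (i, ones)
    else if get_bit num i then loop1 num (i + 1) (ones + 1) trailing
    else loop1 num (i + 1) ones true
  else none
termination_by 32 - i
decreasing_by all_goals omega

-- second `for i in range(32)` loop of A: some = the `return prev`, none = falling off the loop
def loop2 (index ones i : Nat) (prev : Int) : Option Int :=
  if h : i < 32 then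
    if i = index then some (clear_bit prev i)
    else if (index : Int) - (ones : Int) - 1 ≤ (i : Int) then loop2 index ones (i + 1) (set_bit prev i)
    else loop2 index ones (i + 1) (clear_bit prev i)
  else none
termination_by 32 - i
decreasing_by all_goals omega

def get_prev2 (num : Int) : Int :=
  match loop1 num 0 0 false with
  | some (index, ones) => (loop2 index ones 0 num).getD 0
  | none => 0     -- Python raises UnboundLocalError here; excluded by Pre_get_prev2

-- ===== PORT B =====
-- `while ones < 32 and (num >> ones) & 1: ones += 1`
def bOnes (num : Int) (ones : Nat) : Nat :=
  if h : ones < 32 ∧ PySem.Int.band (num >>> ones) 1 ≠ 0 then bOnes num (ones + 1) else ones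
termination_by 32 - ones
decreasing_by omega

-- `while index < 32 and not ((num >> index) & 1): index += 1`
def bIndex (num : Int) (index : Nat) : Nat :=
  if h : index < 32 ∧ PySem.Int.band (num >>> index) 1 = 0 then bIndex num (index + 1) else index
termination_by 32 - index
decreasing_by omega

def get_prev2_alt (num : Int) : Int :=
  let ones := bOnes num 0
  let index := bIndex num (ones + 1)
  -- index ≥ ones + 1 by construction, so Nat subtraction `index - ones - 1` is Python-exact
  PySem.Int.bor (PySem.Int.band num (Int.not (((1:Int) <<< (index + 1)) - 1)))
    ((((1:Int) <<< (ones + 1)) - 1) <<< (index - ones - 1))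

-- ===== PRECONDITION & SPEC =====
-- Pre_ excludes exactly the inputs (e.g. 0, -1, 7) whose low 32 bits never show a set bit above a
-- clear bit: there A's first loop finishes without `break` and A raises UnboundLocalError.
def Pre_get_prev2 (num : Int) : Prop :=
  ∃ i : Fin 32, num.testBit i = true ∧ ∃ j : Fin 32, (j : Nat) < (i : Nat) ∧ num.testBit j = false
instance (num : Int) : Decidable (Pre_get_prev2 num) := by unfold Pre_get_prev2; infer_instance
def pvWitness_get_prev2 : Int := 2

def Spec_get_prev2 (num : Int) (out : Int) : Prop := out = get_prev2_alt num
instance (num : Int) (out : Int) : Decidable (Spec_get_prev2 num out) := by unfold Spec_get_prev2; infer_instance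

-- ===== CLAIM (what is proved, stated in full; the proofs are below) =====
def Claim_equal_get_prev2 : Prop := ∀ (num : Int), Dom_get_prev2 num → Pre_get_prev2 num → Spec_get_prev2 num (get_prev2 num)

-- ===== LEMMAS AND PROOFS =====

-- Nat bit toolkit -------------------------------------------------------------
theorem pv_add_eq_or_of_and_eq_zero : ∀ (x y : Nat), x &&& y = 0 → x + y = x ||| y := by
  intro x
  induction x using Nat.strong_induction_on with
  | _ x ih =>
    intro y h
    rcases Nat.eq_zero_or_pos x with hx | hx
    · subst hx; simp [Nat.zero_or]
    · have hd : x / 2 &&& y / 2 = 0 := by rw [← Nat.and_div_two, h]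
      have ih2 := ih (x / 2) (by omega) (y / 2) hd
      have hor2 : (x ||| y) / 2 = x / 2 ||| y / 2 := Nat.or_div_two
      have hb : (x &&& y).testBit 0 = false := by rw [h]; exact Nat.zero_testBit 0
      rw [Nat.testBit_and, Nat.testBit_zero, Nat.testBit_zero] at hb
      have hbo : (x ||| y).testBit 0 = (x.testBit 0 || y.testBit 0) := Nat.testBit_or x y 0
      rw [Nat.testBit_zero, Nat.testBit_zero, Nat.testBit_zero] at hbo
      simp only [Bool.and_eq_false_iff, decide_eq_false_iff_not] at hb
      rw [← Bool.decide_or, decide_eq_decide] at hbo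
      omega

theorem pv_sub_and_eq_ldiff (m n : Nat) : m - (m &&& n) = m.ldiff n := by
  have hdisj : (m &&& n) &&& m.ldiff n = 0 := by
    apply Nat.eq_of_testBit_eq; intro k
    simp only [Nat.testBit_and, Nat.testBit_ldiff, Nat.zero_testBit]
    cases m.testBit k <;> cases n.testBit k <;> rfl
  have hor : (m &&& n) ||| m.ldiff n = m := by
    apply Nat.eq_of_testBit_eq; intro k
    simp only [Nat.testBit_or, Nat.testBit_and, Nat.testBit_ldiff]
    cases m.testBit k <;> cases n.testBit k <;> rfl
  have hadd := pv_add_eq_or_of_and_eq_zero (m &&& n) (m.ldiff n) hdisj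
  have hle : m &&& n ≤ m := Nat.and_le_left
  omega

-- PySem ↔ Mathlib bitwise bridges --------------------------------------------
theorem pv_band_eq_land (a b : Int) : PySem.Int.band a b = Int.land a b := by
  have key : ∀ m n : Nat, m - (m &&& n) = m.ldiff n := pv_sub_and_eq_ldiff
  cases a with
  | ofNat m =>
    have h0 : (0 : Int) ≤ Int.ofNat m := Int.natCast_nonneg m
    cases b with
    | ofNat n =>
      have h0' : (0 : Int) ≤ Int.ofNat n := Int.natCast_nonneg n
      simp only [PySem.Int.band, if_pos h0, if_pos h0']
      show (↑((Int.ofNat m).toNat &&& (Int.ofNat n).toNat) : Int) = Int.land (Int.ofNat m) (Int.ofNat n)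
      rfl
    | negSucc n =>
      have h2 : ¬ (0 : Int) ≤ Int.negSucc n := by rw [Int.negSucc_eq]; omega
      have h1 : (-(Int.negSucc n) - 1) = (n : Int) := by rw [Int.negSucc_eq]; ring
      simp only [PySem.Int.band, if_pos h0, if_neg h2, h1]
      show (↑(m - (m &&& ((n : Int)).toNat)) : Int) = Int.land (Int.ofNat m) (Int.negSucc n)
      rw [Int.toNat_natCast, key]
      rfl
  | negSucc m =>
    have hm2 : ¬ (0 : Int) ≤ Int.negSucc m := by rw [Int.negSucc_eq]; omega
    have hm1 : (-(Int.negSucc m) - 1) = (m : Int) := by rw [Int.negSucc_eq]; ring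
    cases b with
    | ofNat n =>
      have h0' : (0 : Int) ≤ Int.ofNat n := Int.natCast_nonneg n
      simp only [PySem.Int.band, if_neg hm2, if_pos h0', hm1]
      show (↑(n - (n &&& ((m : Int)).toNat)) : Int) = Int.land (Int.negSucc m) (Int.ofNat n)
      rw [Int.toNat_natCast, key]
      rfl
    | negSucc n =>
      have h2 : ¬ (0 : Int) ≤ Int.negSucc n := by rw [Int.negSucc_eq]; omega
      have h1 : (-(Int.negSucc n) - 1) = (n : Int) := by rw [Int.negSucc_eq]; ring
      simp only [PySem.Int.band, if_neg hm2, if_neg h2, hm1, h1]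
      show -(↑(((m : Int)).toNat ||| ((n : Int)).toNat) : Int) - 1 = Int.land (Int.negSucc m) (Int.negSucc n)
      rw [Int.toNat_natCast, Int.toNat_natCast]
      show -(↑(m ||| n) : Int) - 1 = Int.negSucc (m ||| n)
      rw [Int.negSucc_eq]; ring

theorem pv_bor_eq_lor (a b : Int) : PySem.Int.bor a b = Int.lor a b := by
  have key : ∀ m n : Nat, m - (m &&& n) = m.ldiff n := pv_sub_and_eq_ldiff
  cases a with
  | ofNat m =>
    have h0 : (0 : Int) ≤ Int.ofNat m := Int.natCast_nonneg m
    cases b with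
    | ofNat n =>
      have h0' : (0 : Int) ≤ Int.ofNat n := Int.natCast_nonneg n
      simp only [PySem.Int.bor, if_pos h0, if_pos h0']
      show (↑((Int.ofNat m).toNat ||| (Int.ofNat n).toNat) : Int) = Int.lor (Int.ofNat m) (Int.ofNat n)
      rfl
    | negSucc n =>
      have h2 : ¬ (0 : Int) ≤ Int.negSucc n := by rw [Int.negSucc_eq]; omega
      have h1 : (-(Int.negSucc n) - 1) = (n : Int) := by rw [Int.negSucc_eq]; ring
      simp only [PySem.Int.bor, if_pos h0, if_neg h2, h1]
      show -(↑(((n : Int)).toNat - (((n : Int)).toNat &&& (Int.ofNat m).toNat)) : Int) - 1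
          = Int.lor (Int.ofNat m) (Int.negSucc n)
      rw [Int.toNat_natCast]
      show -(↑(n - (n &&& m)) : Int) - 1 = Int.negSucc (n.ldiff m)
      rw [key, Int.negSucc_eq]; ring
  | negSucc m =>
    have hm2 : ¬ (0 : Int) ≤ Int.negSucc m := by rw [Int.negSucc_eq]; omega
    have hm1 : (-(Int.negSucc m) - 1) = (m : Int) := by rw [Int.negSucc_eq]; ring
    cases b with
    | ofNat n =>
      have h0' : (0 : Int) ≤ Int.ofNat n := Int.natCast_nonneg n
      simp only [PySem.Int.bor, if_neg hm2, if_pos h0', hm1]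
      show -(↑(((m : Int)).toNat - (((m : Int)).toNat &&& (Int.ofNat n).toNat)) : Int) - 1
          = Int.lor (Int.negSucc m) (Int.ofNat n)
      rw [Int.toNat_natCast]
      show -(↑(m - (m &&& n)) : Int) - 1 = Int.negSucc (m.ldiff n)
      rw [key, Int.negSucc_eq]; ring
    | negSucc n =>
      have h2 : ¬ (0 : Int) ≤ Int.negSucc n := by rw [Int.negSucc_eq]; omega
      have h1 : (-(Int.negSucc n) - 1) = (n : Int) := by rw [Int.negSucc_eq]; ring
      simp only [PySem.Int.bor, if_neg hm2, if_neg h2, hm1, h1]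
      show -(↑(((m : Int)).toNat &&& ((n : Int)).toNat) : Int) - 1 = Int.lor (Int.negSucc m) (Int.negSucc n)
      rw [Int.toNat_natCast, Int.toNat_natCast]
      show -(↑(m &&& n) : Int) - 1 = Int.negSucc (m &&& n)
      rw [Int.negSucc_eq]; ring

theorem pv_not_eq_lnot (a : Int) : Int.not a = Int.lnot a := by
  cases a <;> rfl

-- Int testBit toolkit ---------------------------------------------------------
theorem pv_tb_ext {m n : Int} (h : ∀ k, m.testBit k = n.testBit k) : m = n := by
  cases m with
  | ofNat a =>
    cases n with
    | ofNat b =>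
      have : a = b := Nat.eq_of_testBit_eq (fun k => h k)
      rw [this]
    | negSucc b =>
      exfalso
      have hk := h (a + b)
      have ha : a.testBit (a + b) = false :=
        Nat.testBit_lt_two_pow (lt_of_le_of_lt (Nat.le_add_right a b) Nat.lt_two_pow_self)
      have hb : b.testBit (a + b) = false :=
        Nat.testBit_lt_two_pow (lt_of_le_of_lt (Nat.le_add_left b a) Nat.lt_two_pow_self)
      simp [Int.testBit, ha, hb] at hk
  | negSucc a =>
    cases n with
    | ofNat b =>
      exfalso
      have hk := h (a + b)
      have ha : a.testBit (a + b) = false :=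
        Nat.testBit_lt_two_pow (lt_of_le_of_lt (Nat.le_add_right a b) Nat.lt_two_pow_self)
      have hb : b.testBit (a + b) = false :=
        Nat.testBit_lt_two_pow (lt_of_le_of_lt (Nat.le_add_left b a) Nat.lt_two_pow_self)
      simp [Int.testBit, ha, hb] at hk
    | negSucc b =>
      have : a = b := Nat.eq_of_testBit_eq (fun k => by
        have hk := h k
        simp [Int.testBit] at hk
        exact hk)
      rw [this]

theorem pv_tb_band (a b : Int) (k : Nat) :
    (PySem.Int.band a b).testBit k = (a.testBit k && b.testBit k) := by
  rw [pv_band_eq_land]; exact Int.testBit_land a b k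

theorem pv_tb_bor (a b : Int) (k : Nat) :
    (PySem.Int.bor a b).testBit k = (a.testBit k || b.testBit k) := by
  rw [pv_bor_eq_lor]; exact Int.testBit_lor a b k

theorem pv_tb_not (a : Int) (k : Nat) : (Int.not a).testBit k = !a.testBit k := by
  rw [pv_not_eq_lnot]; exact Int.testBit_lnot a k

theorem pv_tb_shiftR (a : Int) (s k : Nat) : (a >>> s).testBit k = a.testBit (s + k) := by
  cases a with
  | ofNat n =>
    show (Int.ofNat (n >>> s)).testBit k = (Int.ofNat n).testBit (s + k)
    simp [Int.testBit, Nat.testBit_shiftRight]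
  | negSucc n =>
    show (Int.negSucc (n >>> s)).testBit k = (Int.negSucc n).testBit (s + k)
    simp [Int.testBit, Nat.testBit_shiftRight]

theorem pv_tb_zero (k : Nat) : (0 : Int).testBit k = false := by
  show (Int.ofNat 0).testBit k = false
  simp [Int.testBit]

theorem pv_tb_one_shl (s k : Nat) : ((1 : Int) <<< s).testBit k = decide (s = k) := by
  show (Int.ofNat (1 <<< s)).testBit k = decide (s = k)
  simp [Int.testBit, Nat.one_shiftLeft, Nat.testBit_two_pow]


theorem pv_tb_one (k : Nat) : (1 : Int).testBit k = decide (0 = k) := by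
  have := pv_tb_one_shl 0 k
  simpa using this

theorem pv_tb_shl_sub_one (s k : Nat) : (((1 : Int) <<< s) - 1).testBit k = decide (k < s) := by
  have h1 : ((1 : Int) <<< s) = Int.ofNat (2 ^ s) := by
    show Int.ofNat (1 <<< s) = Int.ofNat (2 ^ s)
    rw [Nat.one_shiftLeft]
  have h2 : (Int.ofNat (2 ^ s)) - 1 = Int.ofNat (2 ^ s - 1) := by
    have : 1 ≤ 2 ^ s := Nat.one_le_two_pow
    rw [Int.ofNat_eq_natCast, Int.ofNat_eq_natCast]
    omega
  rw [h1, h2]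
  show (2 ^ s - 1 : Nat).testBit k = decide (k < s)
  exact Nat.testBit_two_pow_sub_one s k

theorem pv_tb_block (o L k : Nat) :
    ((((1 : Int) <<< o) - 1) <<< L).testBit k = decide (L ≤ k ∧ k < L + o) := by
  have h1 : (((1 : Int) <<< o) - 1) = Int.ofNat (2 ^ o - 1) := by
    have : ((1 : Int) <<< o) = Int.ofNat (2 ^ o) := by
      show Int.ofNat (1 <<< o) = Int.ofNat (2 ^ o)
      rw [Nat.one_shiftLeft]
    rw [this]
    have : 1 ≤ 2 ^ o := Nat.one_le_two_pow
    rw [Int.ofNat_eq_natCast, Int.ofNat_eq_natCast]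
    omega
  rw [h1]
  show ((2 ^ o - 1 : Nat) <<< L).testBit k = decide (L ≤ k ∧ k < L + o)
  rw [Nat.testBit_shiftLeft, Nat.testBit_two_pow_sub_one]
  by_cases h : L ≤ k
  · by_cases h2 : k < L + o <;> simp [h, h2] <;> try omega
  · simp [h]; try omega

-- get_bit and the shift test read the same bit --------------------------------
theorem pv_get_bit_eq (num : Int) (i : Nat) : get_bit num i = num.testBit i := by
  unfold get_bit
  by_cases h : num.testBit i = true
  · have hb : (PySem.Int.band num ((1 : Int) <<< i)).testBit i = true := by
      rw [pv_tb_band, pv_tb_one_shl]; simp [h]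
    have hne : PySem.Int.band num ((1 : Int) <<< i) ≠ 0 := by
      intro h0; rw [h0, pv_tb_zero] at hb; exact Bool.false_ne_true hb
    simp [hne, h]
  · have hz : PySem.Int.band num ((1 : Int) <<< i) = 0 := by
      apply pv_tb_ext; intro k
      rw [pv_tb_band, pv_tb_one_shl, pv_tb_zero]
      by_cases hk : i = k
      · subst hk; simp [Bool.eq_false_iff.2 h]
      · simp [hk]
    simp [hz]
    simpa using h

theorem pv_shift_test (num : Int) (k : Nat) :
    (PySem.Int.band (num >>> k) 1 = 0) ↔ num.testBit k = false := by
  constructor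
  · intro h0
    have hb := congrArg (fun z => z.testBit 0) h0
    simp only [pv_tb_band, pv_tb_shiftR, pv_tb_one, pv_tb_zero] at hb
    simpa using hb
  · intro hf
    apply pv_tb_ext; intro j
    rw [pv_tb_band, pv_tb_shiftR, pv_tb_one, pv_tb_zero]
    by_cases hj : j = 0
    · subst hj; simp [hf]
    · simp [Ne.symm hj]

-- characterisation of B's two whiles ------------------------------------------
theorem pv_bOnes_ge (num : Int) (i : Nat) : i ≤ bOnes num i := by
  fun_induction bOnes num i with
  | case1 ones h ih => omega
  | case2 ones h => omega

theorem pv_bOnes_min (num : Int) (i j : Nat) (hj : num.testBit j = false) (hij : i ≤ j) :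
    bOnes num i ≤ j := by
  fun_induction bOnes num i with
  | case1 ones h ih =>
    apply ih
    rcases Nat.eq_or_lt_of_le hij with heq | hlt
    · exfalso
      subst heq
      exact h.2 ((pv_shift_test num ones).2 hj)
    · omega
  | case2 ones h => exact hij

theorem pv_bIndex_ge (num : Int) (k : Nat) : k ≤ bIndex num k := by
  fun_induction bIndex num k with
  | case1 index h ih => omega
  | case2 index h => omega

theorem pv_bIndex_min (num : Int) (k i : Nat) (hi : num.testBit i = true) (hki : k ≤ i) :
    bIndex num k ≤ i := by
  fun_induction bIndex num k with
  | case1 index h ih =>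
    apply ih
    rcases Nat.eq_or_lt_of_le hki with heq | hlt
    · exfalso
      subst heq
      rw [(pv_shift_test num index).1 h.2] at hi
      exact Bool.false_ne_true hi
    · omega
  | case2 index h => exact hki

-- A's first loop in terms of B's two whiles ------------------------------------
theorem pv_loop1_true (num : Int) : ∀ k o,
    loop1 num k o true = if bIndex num k < 32 then some (bIndex num k, o) else none := by
  have H : ∀ n k o, 32 - k ≤ n →
      loop1 num k o true = if bIndex num k < 32 then some (bIndex num k, o) else none := by
    intro n
    induction n with
    | zero =>
      intro k o hk
      have h32 : ¬ k < 32 := by omega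
      rw [loop1, bIndex]
      simp [h32]
    | succ n ih =>
      intro k o hk
      by_cases h32 : k < 32
      · by_cases hb : num.testBit k = true
        · have hg : get_bit num k = true := by rw [pv_get_bit_eq]; exact hb
          have hnz : PySem.Int.band (num >>> k) 1 ≠ 0 := by
            intro hz
            rw [(pv_shift_test num k).1 hz] at hb
            exact Bool.false_ne_true hb
          rw [loop1, bIndex]
          simp [h32, hg, hnz]
        · have hbf : num.testBit k = false := Bool.eq_false_iff.2 hb
          have hg : get_bit num k = false := by rw [pv_get_bit_eq]; exact hbf
          have hgo : k < 32 ∧ PySem.Int.band (num >>> k) 1 = 0 :=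
            ⟨h32, (pv_shift_test num k).2 hbf⟩
          rw [loop1, bIndex]
          simp only [h32, hg, hgo, dif_pos]
          simp only [Bool.false_and, Bool.false_eq_true, if_false]
          exact ih (k + 1) o (by omega)
      · have hk32 : ¬ k < 32 := h32
        rw [loop1, bIndex]
        simp [hk32]
  exact fun k o => H 32 k o (by omega)

theorem pv_loop1_false (num : Int) : ∀ i o,
    loop1 num i o false =
      if bOnes num i < 32 then loop1 num (bOnes num i + 1) (o + (bOnes num i - i)) true
      else none := by
  have H : ∀ n i o, 32 - i ≤ n →
      loop1 num i o false =
        if bOnes num i < 32 then loop1 num (bOnes num i + 1) (o + (bOnes num i - i)) true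
        else none := by
    intro n
    induction n with
    | zero =>
      intro i o hi
      have h32 : ¬ i < 32 := by omega
      rw [loop1, bOnes]
      simp [h32]
    | succ n ih =>
      intro i o hi
      by_cases h32 : i < 32
      · by_cases hb : num.testBit i = true
        · have hg : get_bit num i = true := by rw [pv_get_bit_eq]; exact hb
          have hnz : PySem.Int.band (num >>> i) 1 ≠ 0 := by
            intro hz
            rw [(pv_shift_test num i).1 hz] at hb
            exact Bool.false_ne_true hb
          have hgo : i < 32 ∧ PySem.Int.band (num >>> i) 1 ≠ 0 := ⟨h32, hnz⟩
          have hBO : bOnes num i = bOnes num (i + 1) := by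
            rw [bOnes]; exact dif_pos hgo
          have hge : i + 1 ≤ bOnes num i := hBO ▸ pv_bOnes_ge num (i + 1)
          rw [loop1]
          simp only [h32, hg, dif_pos, if_true, Bool.and_false, Bool.false_eq_true, if_false]
          rw [ih (i + 1) (o + 1) (by omega), ← hBO]
          by_cases hlt : bOnes num i < 32
          · simp only [hlt, if_true, if_pos]
            have harith : o + 1 + (bOnes num i - (i + 1)) = o + (bOnes num i - i) := by
              omega
            rw [harith]
          · simp [hlt]
        · have hbf : num.testBit i = false := Bool.eq_false_iff.2 hb
          have hg : get_bit num i = false := by rw [pv_get_bit_eq]; exact hbf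
          have hstop : ¬ (i < 32 ∧ PySem.Int.band (num >>> i) 1 ≠ 0) := by
            rintro ⟨-, hnz⟩
            exact hnz ((pv_shift_test num i).2 hbf)
          have hBO : bOnes num i = i := by rw [bOnes, dif_neg hstop]
          rw [loop1]
          simp only [h32, hg, dif_pos, Bool.false_and, Bool.false_eq_true, if_false]
          rw [hBO]
          simp only [h32, if_pos]
          have : o + (i - i) = o := by omega
          rw [this]
      · have hstop : ¬ (i < 32 ∧ PySem.Int.band (num >>> i) 1 ≠ 0) := by
          rintro ⟨hlt, -⟩; exact h32 hlt
        have hBO : bOnes num i = i := by rw [bOnes, dif_neg hstop]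
        rw [loop1, hBO]
        simp [h32]
  exact fun i o => H 32 i o (by omega)

theorem pv_tb_set (prev : Int) (i k : Nat) :
    (set_bit prev i).testBit k = (prev.testBit k || decide (i = k)) := by
  unfold set_bit; rw [pv_tb_bor, pv_tb_one_shl]

theorem pv_tb_clear (prev : Int) (i k : Nat) :
    (clear_bit prev i).testBit k = (prev.testBit k && !decide (i = k)) := by
  unfold clear_bit; rw [pv_tb_band, pv_tb_not, pv_tb_one_shl]

-- A's second loop: bits i..index get the rebuilt pattern, the rest of prev is kept
theorem pv_loop2_bits (idx o : Nat) (ho : o + 1 ≤ idx) (hidx : idx < 32) : ∀ n i prev, i ≤ idx → n = idx - i →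
    ∃ r, loop2 idx o i prev = some r ∧
      ∀ k, r.testBit k =
        if i ≤ k ∧ k ≤ idx then decide (idx - o - 1 ≤ k ∧ k < idx) else prev.testBit k := by
  intro n
  induction n with
  | zero =>
    intro i prev hi hn
    have hieq : i = idx := by omega
    subst hieq
    refine ⟨clear_bit prev i, ?_, ?_⟩
    · rw [loop2]
      simp [hidx]
    · intro k
      rw [pv_tb_clear]
      by_cases hk : k = i
      · subst hk
        simp
      · have : ¬ (i ≤ k ∧ k ≤ i) := by omega
        simp [this, Ne.symm hk]
  | succ n ih =>
    intro i prev hi hn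
    have hilt : i < idx := by omega
    have h32 : i < 32 := by omega
    have hne : i ≠ idx := by omega
    by_cases hL : (idx : Int) - (o : Int) - 1 ≤ (i : Int)
    · obtain ⟨r, hr, hrb⟩ := ih (i + 1) (set_bit prev i) (by omega) (by omega)
      refine ⟨r, ?_, ?_⟩
      · rw [loop2]
        simp only [h32, dif_pos, hne, if_false, hL, if_true, if_pos]
        exact hr
      · intro k
        rw [hrb k]
        by_cases hk1 : i + 1 ≤ k ∧ k ≤ idx
        · have : i ≤ k ∧ k ≤ idx := by omega
          simp [hk1, this]
        · rw [pv_tb_set]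
          by_cases hk : k = i
          · subst hk
            have hc : k ≤ k ∧ k ≤ idx := by omega
            have hL' : idx - o - 1 ≤ k := by omega
            simp [hk1, hc, hL', hilt]
          · have hni : ¬ (i ≤ k ∧ k ≤ idx) := by omega
            simp [hk1, hni, Ne.symm hk]
            intro h1 h2
            exact absurd ⟨by omega, h2⟩ hni
    · obtain ⟨r, hr, hrb⟩ := ih (i + 1) (clear_bit prev i) (by omega) (by omega)
      refine ⟨r, ?_, ?_⟩
      · rw [loop2]
        simp only [h32, dif_pos, hne, if_false, hL, if_true, if_pos]
        exact hr
      · intro k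
        rw [hrb k]
        by_cases hk1 : i + 1 ≤ k ∧ k ≤ idx
        · have : i ≤ k ∧ k ≤ idx := by omega
          simp [hk1, this]
        · rw [pv_tb_clear]
          by_cases hk : k = i
          · subst hk
            have hc : k ≤ k ∧ k ≤ idx := by omega
            have hL' : ¬ (idx - o - 1 ≤ k) := by omega
            simp [hk1, hc, hL']
          · have hni : ¬ (i ≤ k ∧ k ≤ idx) := by omega
            simp [hk1, hni, Ne.symm hk]
            intro h1 h2
            exact absurd ⟨by omega, h2⟩ hni

-- ===== VERDICT (by name: the statement is the Claim_ definition above) =====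
theorem get_prev2_spec : Claim_equal_get_prev2 := by
  intro num _ hpre
  unfold Spec_get_prev2
  obtain ⟨i, hi, j, hji, hj⟩ := hpre
  have htle : bOnes num 0 ≤ (j : Nat) := pv_bOnes_min num 0 j hj (Nat.zero_le j)
  have ht32 : bOnes num 0 < 32 := lt_of_le_of_lt htle j.isLt
  have hidxle : bIndex num (bOnes num 0 + 1) ≤ (i : Nat) :=
    pv_bIndex_min num (bOnes num 0 + 1) i hi (by omega)
  have hidx32 : bIndex num (bOnes num 0 + 1) < 32 := lt_of_le_of_lt hidxle i.isLt
  have hidxge : bOnes num 0 + 1 ≤ bIndex num (bOnes num 0 + 1) :=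
    pv_bIndex_ge num (bOnes num 0 + 1)
  have h1 : loop1 num 0 0 false = some (bIndex num (bOnes num 0 + 1), bOnes num 0) := by
    rw [pv_loop1_false num 0 0, if_pos ht32, pv_loop1_true, if_pos hidx32]
    have : 0 + (bOnes num 0 - 0) = bOnes num 0 := by omega
    rw [this]
  obtain ⟨r, hr, hrb⟩ :=
    pv_loop2_bits (bIndex num (bOnes num 0 + 1)) (bOnes num 0) hidxge hidx32
      (bIndex num (bOnes num 0 + 1)) 0 num (Nat.zero_le _) (by omega)
  unfold get_prev2
  rw [h1]
  show (loop2 (bIndex num (bOnes num 0 + 1)) (bOnes num 0) 0 num).getD 0 = get_prev2_alt num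
  rw [hr]
  show r = get_prev2_alt num
  unfold get_prev2_alt
  apply pv_tb_ext
  intro k
  rw [hrb k, pv_tb_bor, pv_tb_band, pv_tb_not, pv_tb_shl_sub_one, pv_tb_block]
  have harr : bIndex num (bOnes num 0 + 1) - bOnes num 0 - 1 + (bOnes num 0 + 1)
      = bIndex num (bOnes num 0 + 1) := by omega
  rw [harr]
  by_cases hk : k ≤ bIndex num (bOnes num 0 + 1)
  · have h0 : 0 ≤ k ∧ k ≤ bIndex num (bOnes num 0 + 1) := ⟨Nat.zero_le k, hk⟩
    have h1' : k < bIndex num (bOnes num 0 + 1) + 1 := by omega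
    simp [h0, h1']
  · have h1' : ¬ k < bIndex num (bOnes num 0 + 1) + 1 := by omega
    have hlt : ¬ k < bIndex num (bOnes num 0 + 1) := by omega
    simp [hk, h1', hlt]
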